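-- pv_equiv track=rewrite | github.com/cclib/cclib | recipes/qchem_make_opt_input_from_opt.py | parse_fragments_from_molecule
-- ===== SOURCE A (Python) =====
-- def parse_fragments_from_molecule(molecule):
--     """Given a $molecule section (without the $ lines), identify the
--     charges and multiplicities of each fragment and the zero-based indices
--     for the starting atom of each fragment.
--     """
--
--     charges = []
--     multiplicities = []
--     start_indices = []
--     it = iter(molecule.splitlines())
--     line = next(it)
--     # sys_charge, sys_multiplicity = line.split()
--     counter = 0
--     # Gather the charges, spin multiplicities, and starting positions
--     # of each fragment.
--     for line in it:
--         if "--" in line: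
--             line = next(it)
--             charge, multiplicity = line.split()
--             charges.append(charge)
--             multiplicities.append(multiplicity)
--             start_indices.append(counter)
--         else:
--             counter += 1
--     assert len(charges) == len(multiplicities) == len(start_indices)
--
--     return charges, multiplicities, start_indices
-- ===== SOURCE B (Python) =====
-- def parse_fragments_from_molecule(molecule):
--     """Block-wise re-implementation: after dropping the header line, repeatedly
--     locate the next '--' separator, count the atom lines before it, read the
--     charge/multiplicity line right after it, and continue past that pair."""
--     rest = molecule.splitlines()[1:]
--     charges = []
--     multiplicities = []
--     start_indices = []
--     atoms = 0
--     while True: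
--         sep = next((i for i, l in enumerate(rest) if "--" in l), None)
--         if sep is None:
--             break
--         atoms += sep
--         charge, multiplicity = rest[sep + 1].split()
--         charges.append(charge)
--         multiplicities.append(multiplicity)
--         start_indices.append(atoms)
--         rest = rest[sep + 2:]
--     return charges, multiplicities, start_indices
-- ===== Notes on version B (the rewrite author's own statement) =====
-- stated objective: alternative
-- what changed: Replaces A's interleaved next()-driven iterator state machine with a block decomposition: repeatedly find the next '--' separator line, add the atom lines before it to a cumulative count, unpack the line right after it as charge/multiplicity, and slice past the block.
import Mathlib
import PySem

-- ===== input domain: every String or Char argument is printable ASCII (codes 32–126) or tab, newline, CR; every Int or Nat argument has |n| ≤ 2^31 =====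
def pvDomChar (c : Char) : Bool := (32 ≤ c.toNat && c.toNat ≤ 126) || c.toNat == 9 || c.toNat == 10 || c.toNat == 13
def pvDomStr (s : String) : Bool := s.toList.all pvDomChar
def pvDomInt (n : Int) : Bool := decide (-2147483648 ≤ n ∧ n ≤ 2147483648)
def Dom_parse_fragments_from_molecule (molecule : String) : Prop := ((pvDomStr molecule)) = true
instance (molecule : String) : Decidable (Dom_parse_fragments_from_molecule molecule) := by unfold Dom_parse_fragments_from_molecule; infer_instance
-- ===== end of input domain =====

-- B replaces A's interleaved next()-driven state machine by a block decomposition: repeatedly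
-- locate the next '--' separator, accumulate the atom-line count before it, and read the
-- charge/multiplicity line just after it (objective: alternative decomposition, same cost).


-- ===== PORT A =====
-- the for-loop over the iterator, with next(it) consuming the line after each '--' separator
def pvA_go (lines : List String) (cs ms : List String) (ss : List Int) (counter : Int) :
    List String × List String × List Int :=
  match lines with
  | [] => (cs, ms, ss)
  | l :: rest =>
    if PySem.Str.isIn "--" l then
      match rest with
      | [] => (cs, ms, ss)              -- next(it) raises StopIteration: outside Pre_
      | l2 :: rest2 =>
        match PySem.Str.split₀ l2 with
        | [c, m] => pvA_go rest2 (cs ++ [c]) (ms ++ [m]) (ss ++ [counter]) counter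
        | _ => (cs, ms, ss)             -- unpacking raises ValueError: outside Pre_
    else pvA_go rest cs ms ss (counter + 1)

def parse_fragments_from_molecule (molecule : String) : List String × List String × List Int :=
  match PySem.Str.splitlines molecule with
  | [] => ([], [], [])                  -- next(it) raises StopIteration: outside Pre_
  | _ :: rest => pvA_go rest [] [] [] 0

-- ===== PORT B =====
-- next((i for i, l in enumerate(rest) if "--" in l), None)
def pvFindSep : List String → Option Nat
  | [] => none
  | l :: rest => if PySem.Str.isIn "--" l then some 0 else (pvFindSep rest).map (· + 1)

-- needed by pvB_go's termination argument
theorem pvFindSep_lt : ∀ (xs : List String) (i : Nat), pvFindSep xs = some i → i < xs.length := by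
  intro xs
  induction xs with
  | nil => intro i h; cases h
  | cons l rest ih =>
    intro i h
    by_cases hc : PySem.Str.isIn "--" l = true
    · rw [pvFindSep, if_pos hc] at h
      injection h with h
      subst h
      simp
    · have hc' : PySem.Str.isIn "--" l = false := by
        cases hb : PySem.Str.isIn "--" l
        · rfl
        · exact absurd hb hc
      rw [pvFindSep, if_neg (by rw [hc']; exact Bool.false_ne_true)] at h
      rw [Option.map_eq_some_iff] at h
      obtain ⟨j, hj, rfl⟩ := h
      have := ih j hj
      simp
      omega

-- the while loop of Source B, slicing rest past each processed block
def pvB_go (rest : List String) (cs ms : List String) (ss : List Int) (atoms : Int) :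
    List String × List String × List Int :=
  match h : pvFindSep rest with
  | none => (cs, ms, ss)
  | some sep =>
    match rest[sep + 1]? with
    | none => (cs, ms, ss)              -- rest[sep+1] raises IndexError: outside Pre_
    | some l2 =>
      match PySem.Str.split₀ l2 with
      | [c, m] => pvB_go (rest.drop (sep + 2)) (cs ++ [c]) (ms ++ [m]) (ss ++ [atoms + sep]) (atoms + sep)
      | _ => (cs, ms, ss)               -- unpacking raises ValueError: outside Pre_
  termination_by rest.length
  decreasing_by
    have := pvFindSep_lt rest sep h
    simp
    omega

def parse_fragments_from_molecule_alt (molecule : String) : List String × List String × List Int :=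
  pvB_go (PySem.Str.splitlines molecule).tail [] [] [] 0

-- ===== PRECONDITION & SPEC =====
-- Among the lines after the first, line i is processed as a '--' separator exactly when it
-- contains '--' and the maximal run of consecutive '--'-containing lines ending at i has odd
-- length (the even positions of a run are consumed as charge lines by the preceding separator).
abbrev pvSepAt (rest : List String) (i : Nat) : Prop :=
  ∃ a, a ≤ i ∧ Even (i - a) ∧
    (∀ j, a ≤ j → j ≤ i → PySem.Str.isIn "--" (rest.getD j "") = true) ∧
    (a = 0 ∨ PySem.Str.isIn "--" (rest.getD (a - 1) "") = false)

-- Pre_ excludes exactly the inputs where A raises (StopIteration on an empty molecule or a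
-- trailing '--' separator, ValueError on a charge line without exactly two tokens): at least
-- one line, and every separator position is followed by a line of exactly two tokens
def Pre_parse_fragments_from_molecule (molecule : String) : Prop :=
  PySem.Str.splitlines molecule ≠ [] ∧
  ∀ i, i < (PySem.Str.splitlines molecule).tail.length →
    pvSepAt (PySem.Str.splitlines molecule).tail i →
    i + 1 < (PySem.Str.splitlines molecule).tail.length ∧
    (PySem.Str.split₀ ((PySem.Str.splitlines molecule).tail.getD (i + 1) "")).length = 2
instance (molecule : String) : Decidable (Pre_parse_fragments_from_molecule molecule) := by
  unfold Pre_parse_fragments_from_molecule; infer_instance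

def pvWitness_parse_fragments_from_molecule : String := "a"

def Spec_parse_fragments_from_molecule (molecule : String) (out : List String × List String × List Int) : Prop := out = parse_fragments_from_molecule_alt molecule
instance (molecule : String) (out : List String × List String × List Int) : Decidable (Spec_parse_fragments_from_molecule molecule out) := by unfold Spec_parse_fragments_from_molecule; infer_instance

-- ===== CLAIM (what is proved, stated in full; the proofs are below) =====
def Claim_equal_parse_fragments_from_molecule : Prop := ∀ (molecule : String), Dom_parse_fragments_from_molecule molecule → Pre_parse_fragments_from_molecule molecule → Spec_parse_fragments_from_molecule molecule (parse_fragments_from_molecule molecule)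

-- ===== LEMMAS AND PROOFS =====

-- proof-side helper: the sequential well-formedness check that A's loop effectively performs
def pvValid (lines : List String) : Bool :=
  match lines with
  | [] => true
  | l :: rest =>
    if PySem.Str.isIn "--" l then
      match rest with
      | [] => false
      | l2 :: rest2 => (PySem.Str.split₀ l2).length == 2 && pvValid rest2
    else pvValid rest

theorem pv_not_sepAt_zero {l : String} {rest : List String}
    (hl : PySem.Str.isIn "--" l = false) : ¬ pvSepAt (l :: rest) 0 := by
  rintro ⟨a, ha, _, hall, _⟩
  have h0 := hall 0 (by omega) (by omega)
  rw [List.getD_cons_zero] at h0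
  rw [hl] at h0
  cases h0

theorem pv_sepAt_zero {l : String} {rest : List String}
    (hl : PySem.Str.isIn "--" l = true) : pvSepAt (l :: rest) 0 := by
  refine ⟨0, le_rfl, by simp, ?_, Or.inl rfl⟩
  intro j h1 h2
  have : j = 0 := by omega
  subst this
  rw [List.getD_cons_zero]
  exact hl

theorem pv_not_sepAt_one {l : String} {rest : List String}
    (hl : PySem.Str.isIn "--" l = true) : ¬ pvSepAt (l :: rest) 1 := by
  rintro ⟨a, ha, hev, hall, hb⟩
  match a, ha with
  | 0, _ => simp [Nat.even_iff] at hev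
  | 1, _ =>
    rcases hb with h | h
    · cases h
    · rw [List.getD_cons_zero] at h; rw [hl] at h; cases h

theorem pv_sepAt_shift1 {l : String} {rest : List String}
    (hl : PySem.Str.isIn "--" l = false) (i : Nat) :
    pvSepAt (l :: rest) (i + 1) ↔ pvSepAt rest i := by
  constructor
  · rintro ⟨a, ha, hev, hall, hb⟩
    match a with
    | 0 =>
      have h0 := hall 0 (by omega) (by omega)
      rw [List.getD_cons_zero, hl] at h0
      cases h0
    | b + 1 =>
      refine ⟨b, by omega, ?_, ?_, ?_⟩
      · have : i + 1 - (b + 1) = i - b := by omega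
        rw [this] at hev
        exact hev
      · intro j h1 h2
        have := hall (j + 1) (by omega) (by omega)
        rwa [List.getD_cons_succ] at this
      · rcases hb with h | h
        · cases h
        · match b with
          | 0 => exact Or.inl rfl
          | b' + 1 =>
            right
            have : b' + 1 + 1 - 1 = b' + 1 := by omega
            rw [this, List.getD_cons_succ] at h
            exact h
  · rintro ⟨b, hb', hev, hall, hb⟩
    refine ⟨b + 1, by omega, ?_, ?_, ?_⟩
    · have : i + 1 - (b + 1) = i - b := by omega
      rw [this]
      exact hev
    · intro j h1 h2
      match j, h1 with
      | j' + 1, _ =>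
        rw [List.getD_cons_succ]
        exact hall j' (by omega) (by omega)
    · right
      have : b + 1 - 1 = b := by omega
      rw [this]
      match b with
      | 0 => rw [List.getD_cons_zero]; exact hl
      | b' + 1 =>
        rw [List.getD_cons_succ]
        rcases hb with h | h
        · cases h
        · have : b' + 1 - 1 = b' := by omega
          rw [this] at h
          exact h

theorem pv_sepAt_shift2 {l l2 : String} {rest : List String}
    (hl : PySem.Str.isIn "--" l = true) (i : Nat) :
    pvSepAt (l :: l2 :: rest) (i + 2) ↔ pvSepAt rest i := by
  constructor
  · rintro ⟨a, ha, hev, hall, hb⟩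
    match a with
    | 0 =>
      refine ⟨0, by omega, ?_, ?_, Or.inl rfl⟩
      · rw [Nat.even_iff] at hev ⊢
        omega
      · intro j h1 h2
        have := hall (j + 2) (by omega) (by omega)
        rwa [List.getD_cons_succ, List.getD_cons_succ] at this
    | 1 =>
      rcases hb with h | h
      · cases h
      · rw [List.getD_cons_zero, hl] at h; cases h
    | b + 2 =>
      refine ⟨b, by omega, ?_, ?_, ?_⟩
      · have : i + 2 - (b + 2) = i - b := by omega
        rw [this] at hev
        exact hev
      · intro j h1 h2
        have := hall (j + 2) (by omega) (by omega)
        rwa [List.getD_cons_succ, List.getD_cons_succ] at this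
      · match b with
        | 0 =>
          exact Or.inl rfl
        | b' + 1 =>
          right
          rcases hb with h | h
          · cases h
          · have : b' + 1 + 2 - 1 = b' + 2 := by omega
            rw [this, List.getD_cons_succ, List.getD_cons_succ] at h
            have : b' + 1 - 1 = b' := by omega
            rw [this]
            exact h
  · rintro ⟨b, hb', hev, hall, hb⟩
    match b with
    | 0 =>
      cases hl2 : PySem.Str.isIn "--" l2 with
      | true =>
        refine ⟨0, by omega, ?_, ?_, Or.inl rfl⟩
        · rw [Nat.even_iff] at hev ⊢
          omega
        · intro j _ h2
          match j with
          | 0 => rw [List.getD_cons_zero]; exact hl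
          | 1 => rw [List.getD_cons_succ, List.getD_cons_zero]; exact hl2
          | j' + 2 =>
            rw [List.getD_cons_succ, List.getD_cons_succ]
            exact hall j' (by omega) (by omega)
      | false =>
        refine ⟨2, by omega, ?_, ?_, ?_⟩
        · have h1 : i + 2 - 2 = i := by omega
          rw [h1]
          have h2 : i - 0 = i := by omega
          rw [h2] at hev
          exact hev
        · intro j h1 h2
          match j, h1 with
          | j' + 2, _ =>
            rw [List.getD_cons_succ, List.getD_cons_succ]
            exact hall j' (by omega) (by omega)
        · right
          rw [show (2 : Nat) - 1 = 1 from rfl, List.getD_cons_succ, List.getD_cons_zero]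
          exact hl2
    | b' + 1 =>
      refine ⟨b' + 3, by omega, ?_, ?_, ?_⟩
      · have : i + 2 - (b' + 3) = i - (b' + 1) := by omega
        rw [this]
        exact hev
      · intro j h1 h2
        match j, h1 with
        | j' + 2, _ =>
          rw [List.getD_cons_succ, List.getD_cons_succ]
          exact hall j' (by omega) (by omega)
      · right
        rw [show b' + 3 - 1 = b' + 2 from by omega, List.getD_cons_succ, List.getD_cons_succ]
        rcases hb with h | h
        · cases h
        · rw [show b' + 1 - 1 = b' from by omega] at h
          exact h

-- the quantified separator condition of Pre_ is the sequential check pvValid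
theorem pvQ_iff : ∀ (k : Nat) (rest : List String), rest.length ≤ k →
    ((∀ i, i < rest.length → pvSepAt rest i →
        i + 1 < rest.length ∧ (PySem.Str.split₀ (rest.getD (i + 1) "")).length = 2)
      ↔ pvValid rest = true) := by
  intro k
  induction k with
  | zero =>
    intro rest hk
    have : rest = [] := List.length_eq_zero_iff.mp (by omega)
    subst this
    constructor
    · intro _; rfl
    · intro _ i hi; simp at hi
  | succ k ih =>
    intro rest hk
    match rest with
    | [] =>
      constructor
      · intro _; rfl
      · intro _ i hi; simp at hi
    | l :: rest' =>
      cases hl : PySem.Str.isIn "--" l with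
      | false =>
        have hval : pvValid (l :: rest') = pvValid rest' := by
          rw [pvValid.eq_def]
          dsimp only
          rw [if_neg (by rw [hl]; exact Bool.false_ne_true)]
        rw [hval, ← ih rest' (by simp at hk; omega)]
        constructor
        · intro H i hi hsep
          have := H (i + 1) (by simp; omega) ((pv_sepAt_shift1 hl i).mpr hsep)
          refine ⟨by simp at this ⊢; omega, ?_⟩
          rw [List.getD_cons_succ] at this
          exact this.2
        · intro H i hi hsep
          match i with
          | 0 => exact absurd hsep (pv_not_sepAt_zero hl)
          | i' + 1 =>
            have := H i' (by simp at hi; omega) ((pv_sepAt_shift1 hl i').mp hsep)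
            refine ⟨by simp at this ⊢; omega, ?_⟩
            rw [List.getD_cons_succ]
            exact this.2
      | true =>
        match rest' with
        | [] =>
          constructor
          · intro H
            have := H 0 (by simp) (pv_sepAt_zero hl)
            simp at this
          · intro H
            rw [pvValid.eq_def] at H
            dsimp only at H
            rw [if_pos hl] at H
            cases H
        | l2 :: rest2 =>
          have hval : pvValid (l :: l2 :: rest2)
              = ((PySem.Str.split₀ l2).length == 2 && pvValid rest2) := by
            rw [pvValid.eq_def]
            dsimp only
            rw [if_pos hl]
          rw [hval]
          have hih := ih rest2 (by simp at hk; omega)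
          constructor
          · intro H
            have h0 := H 0 (by simp) (pv_sepAt_zero hl)
            rw [List.getD_cons_succ, List.getD_cons_zero] at h0
            have hQ2 : pvValid rest2 = true := by
              rw [← hih]
              intro i hi hsep
              have := H (i + 2) (by simp; omega) ((pv_sepAt_shift2 hl i).mpr hsep)
              refine ⟨by simp at this ⊢; omega, ?_⟩
              rw [List.getD_cons_succ, List.getD_cons_succ] at this
              exact this.2
            rw [hQ2, h0.2]
            simp
          · intro H
            simp only [Bool.and_eq_true, beq_iff_eq] at H
            obtain ⟨htok, hQ2⟩ := H
            intro i hi hsep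
            match i with
            | 0 =>
              refine ⟨by simp, ?_⟩
              rw [List.getD_cons_succ, List.getD_cons_zero]
              exact htok
            | 1 => exact absurd hsep (pv_not_sepAt_one hl)
            | i' + 2 =>
              have := (hih.mpr hQ2) i' (by simp at hi; omega) ((pv_sepAt_shift2 hl i').mp hsep)
              refine ⟨by simp at this ⊢; omega, ?_⟩
              rw [List.getD_cons_succ, List.getD_cons_succ]
              exact this.2

theorem pvFindSep_nil : pvFindSep [] = none := rfl

theorem pvFindSep_none {xs : List String} (h : pvFindSep xs = none) :
    ∀ l ∈ xs, PySem.Str.isIn "--" l = false := by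
  induction xs with
  | nil => simp
  | cons l rest ih =>
    by_cases hc : PySem.Str.isIn "--" l = true
    · rw [pvFindSep, if_pos hc] at h; cases h
    · have hc' : PySem.Str.isIn "--" l = false := by
        cases hb : PySem.Str.isIn "--" l
        · rfl
        · exact absurd hb hc
      rw [pvFindSep, if_neg (by rw [hc']; exact Bool.false_ne_true)] at h
      rw [Option.map_eq_none_iff] at h
      intro x hx
      simp only [List.mem_cons] at hx
      rcases hx with rfl | hx
      · exact hc'
      · exact ih h x hx

theorem pvFindSep_some : ∀ (xs : List String) (sep : Nat), pvFindSep xs = some sep →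
    (∀ l ∈ xs.take sep, PySem.Str.isIn "--" l = false) ∧
    ∃ l post, xs.drop sep = l :: post ∧ PySem.Str.isIn "--" l = true := by
  intro xs
  induction xs with
  | nil => intro sep h; cases h
  | cons l rest ih =>
    intro sep h
    by_cases hc : PySem.Str.isIn "--" l = true
    · rw [pvFindSep, if_pos hc] at h
      injection h with h
      subst h
      exact ⟨by simp, l, rest, rfl, hc⟩
    · have hc' : PySem.Str.isIn "--" l = false := by
        cases hb : PySem.Str.isIn "--" l
        · rfl
        · exact absurd hb hc
      rw [pvFindSep, if_neg (by rw [hc']; exact Bool.false_ne_true)] at h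
      rw [Option.map_eq_some_iff] at h
      obtain ⟨j, hj, rfl⟩ := h
      obtain ⟨h1, l', post, h2, h3⟩ := ih j hj
      refine ⟨?_, l', post, by simpa using h2, h3⟩
      intro x hx
      simp only [List.take_succ_cons, List.mem_cons] at hx
      rcases hx with rfl | hx
      · exact hc'
      · exact h1 x hx

theorem pvB_go_none {rest : List String} (h : pvFindSep rest = none)
    (cs ms : List String) (ss : List Int) (n : Int) : pvB_go rest cs ms ss n = (cs, ms, ss) := by
  rw [pvB_go]
  split
  · rfl
  · rename_i sep hs; rw [h] at hs; cases hs

theorem pvB_go_step {rest : List String} {sep : Nat} {l2 c m : String}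
    (hfs : pvFindSep rest = some sep) (hget : rest[sep + 1]? = some l2)
    (hcm : PySem.Str.split₀ l2 = [c, m]) (cs ms : List String) (ss : List Int) (n : Int) :
    pvB_go rest cs ms ss n
      = pvB_go (rest.drop (sep + 2)) (cs ++ [c]) (ms ++ [m]) (ss ++ [n + sep]) (n + sep) := by
  rw [pvB_go]
  split
  · rename_i hs; rw [hfs] at hs; cases hs
  · rename_i sep' hs
    rw [hfs] at hs
    injection hs with hs
    subst hs
    rw [hget]
    dsimp only
    rw [hcm]

-- A's loop walks past non-separator lines, only incrementing the counter
theorem pvA_go_skip : ∀ (pre : List String), (∀ l ∈ pre, PySem.Str.isIn "--" l = false) →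
    ∀ (xs cs ms : List String) (ss : List Int) (n : Int),
    pvA_go (pre ++ xs) cs ms ss n = pvA_go xs cs ms ss (n + pre.length) := by
  intro pre
  induction pre with
  | nil => intro _ xs cs ms ss n; simp
  | cons l rest ih =>
    intro h xs cs ms ss n
    have hl : PySem.Str.isIn "--" l = false := h l (by simp)
    rw [List.cons_append, pvA_go.eq_def]
    dsimp only
    rw [if_neg (by rw [hl]; exact Bool.false_ne_true)]
    rw [ih (fun x hx => h x (by simp [hx]))]
    congr 1
    push_cast [List.length_cons]
    ring

-- validity is unaffected by a separator-free prefix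
theorem pvValid_skip : ∀ (pre : List String), (∀ l ∈ pre, PySem.Str.isIn "--" l = false) →
    ∀ (xs : List String), pvValid (pre ++ xs) = pvValid xs := by
  intro pre
  induction pre with
  | nil => simp
  | cons l rest ih =>
    intro h xs
    have hl : PySem.Str.isIn "--" l = false := h l (by simp)
    rw [List.cons_append, pvValid.eq_def]
    dsimp only
    rw [if_neg (by rw [hl]; exact Bool.false_ne_true)]
    exact ih (fun x hx => h x (by simp [hx])) xs

theorem pvA_go_noSep {xs : List String} (h : ∀ l ∈ xs, PySem.Str.isIn "--" l = false) :
    ∀ (cs ms : List String) (ss : List Int) (n : Int), pvA_go xs cs ms ss n = (cs, ms, ss) := by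
  induction xs with
  | nil => intro cs ms ss n; rfl
  | cons l rest ih =>
    intro cs ms ss n
    have hl : PySem.Str.isIn "--" l = false := h l (by simp)
    rw [pvA_go.eq_def]
    dsimp only
    rw [if_neg (by rw [hl]; exact Bool.false_ne_true)]
    exact ih (fun x hx => h x (by simp [hx])) cs ms ss (n + 1)

-- the key equivalence of the two loops on valid line lists
theorem pv_key : ∀ (k : Nat) (xs : List String), xs.length ≤ k → pvValid xs = true →
    ∀ (cs ms : List String) (ss : List Int) (n : Int),
    pvA_go xs cs ms ss n = pvB_go xs cs ms ss n := by
  intro k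
  induction k with
  | zero =>
    intro xs hk _ cs ms ss n
    have hx : xs = [] := List.length_eq_zero_iff.mp (by omega)
    subst hx
    rw [pvB_go_none pvFindSep_nil]
    rfl
  | succ k ih =>
    intro xs hk hv cs ms ss n
    match hfs : pvFindSep xs with
    | none =>
      rw [pvA_go_noSep (pvFindSep_none hfs), pvB_go_none hfs]
    | some sep =>
      have hsep := pvFindSep_lt xs sep hfs
      obtain ⟨hpre, l, post, hdrop, hl⟩ := pvFindSep_some xs sep hfs
      have hxs : xs = xs.take sep ++ l :: post := by
        conv_lhs => rw [← List.take_append_drop sep xs, hdrop]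
      have hlen : (xs.take sep).length = sep := by simp; omega
      have hv' : pvValid (l :: post) = true := by
        rw [hxs, pvValid_skip _ hpre] at hv
        exact hv
      rw [pvValid.eq_def] at hv'
      dsimp only at hv'
      rw [if_pos hl] at hv'
      match hpost : post with
      | [] => dsimp only at hv'; cases hv'
      | l2 :: rest2 =>
        dsimp only at hv'
        simp only [Bool.and_eq_true, beq_iff_eq] at hv'
        obtain ⟨hsplit, hv2⟩ := hv'
        obtain ⟨c, m, hcm⟩ : ∃ c m, PySem.Str.split₀ l2 = [c, m] := by
          match hs : PySem.Str.split₀ l2 with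
          | [] => rw [hs] at hsplit; cases hsplit
          | [a] => rw [hs] at hsplit; cases hsplit
          | [a, b] => exact ⟨a, b, rfl⟩
          | a :: b :: e :: t => rw [hs] at hsplit; simp at hsplit
        have hA : pvA_go xs cs ms ss n
            = pvA_go rest2 (cs ++ [c]) (ms ++ [m]) (ss ++ [n + sep]) (n + sep) := by
          conv_lhs => rw [hxs]
          rw [pvA_go_skip _ hpre, hlen, pvA_go.eq_def]
          dsimp only
          rw [if_pos hl, hcm]
        have hget : xs[sep + 1]? = some l2 := by
          rw [← List.head?_drop]
          have h1 : xs.drop (sep + 1) = l2 :: rest2 := by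
            have := congrArg (List.drop 1) hdrop
            simpa [List.drop_drop, Nat.add_comm] using this
          rw [h1]
          rfl
        have hdrop2 : xs.drop (sep + 2) = rest2 := by
          have := congrArg (List.drop 2) hdrop
          rw [List.drop_drop] at this
          rw [this]
          rfl
        rw [hA, pvB_go_step hfs hget hcm, hdrop2]
        have hlen2 : rest2.length ≤ k := by
          have := congrArg List.length hxs
          simp [hlen] at this
          omega
        exact ih rest2 hlen2 hv2 _ _ _ _

-- ===== VERDICT (by name: the statement is the Claim_ definition above) =====
theorem parse_fragments_from_molecule_spec : Claim_equal_parse_fragments_from_molecule := by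
  intro molecule _ hpre
  obtain ⟨hne, hq⟩ := hpre
  have hv : pvValid (PySem.Str.splitlines molecule).tail = true :=
    (pvQ_iff (PySem.Str.splitlines molecule).tail.length _ le_rfl).mp hq
  unfold Spec_parse_fragments_from_molecule parse_fragments_from_molecule parse_fragments_from_molecule_alt
  match hsl : PySem.Str.splitlines molecule with
  | [] => exact absurd hsl hne
  | _ :: rest =>
    rw [hsl] at hv
    dsimp only
    simp only [List.tail_cons] at hv ⊢
    exact pv_key rest.length rest le_rfl hv [] [] [] 0
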